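-- pv_equiv track=rewrite | github.com/REGG24/Python-Projects | Exercises/count_caracters.py | count_caracters2
-- ===== SOURCE A (Python) =====
-- def count_caracters2(palabra, caracteres):
--     diccionario = {}
--     for caracter in caracteres:
--         if caracter in diccionario:
--             # if diccionario.get(caracter):
--             diccionario[caracter] += 1
--         else:
--             if caracter in palabra:
--                 diccionario[caracter] = 1
--             else:
--                 diccionario[caracter] = 0
--
--     return diccionario
-- ===== SOURCE B (Python) =====
-- def count_caracters2(palabra, caracteres):
--     # Two separate passes: first a plain frequency table in first-appearance
--     # order, then a comprehension applying the membership adjustment.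
--     counts = {}
--     for c in caracteres:
--         counts[c] = counts.get(c, 0) + 1
--     return {c: (n if c in palabra else n - 1) for c, n in counts.items()}
-- ===== Notes on version B (the rewrite author's own statement) =====
-- stated objective: simpler
-- what changed: A's single interleaved loop (branching on dict membership and on membership in palabra at first sight of each char) is replaced by two separate passes: a plain counting loop, then a comprehension over the distinct counted items that subtracts 1 for chars not in palabra.
import Mathlib
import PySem

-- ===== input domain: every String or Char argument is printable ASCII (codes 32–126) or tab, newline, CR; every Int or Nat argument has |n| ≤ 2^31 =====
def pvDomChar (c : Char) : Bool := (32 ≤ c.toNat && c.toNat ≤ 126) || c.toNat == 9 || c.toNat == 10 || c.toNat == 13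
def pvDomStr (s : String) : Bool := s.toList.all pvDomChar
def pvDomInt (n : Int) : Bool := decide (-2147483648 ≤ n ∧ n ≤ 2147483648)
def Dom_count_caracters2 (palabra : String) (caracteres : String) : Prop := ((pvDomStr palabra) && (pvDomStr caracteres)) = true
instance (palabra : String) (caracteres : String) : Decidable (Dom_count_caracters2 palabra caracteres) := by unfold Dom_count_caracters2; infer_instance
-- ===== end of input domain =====

-- B separates A's single interleaved count-and-branch loop into two passes: a plain
-- frequency count, then a membership adjustment over the distinct items (simpler decomposition).


-- ===== PORT A =====
-- literal port of A: one loop; dict keys are the 1-char strings; 'caracter in palabra' is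
-- Python's substring test, ported exactly with PySem.Str.isIn on the singleton string
def count_caracters2 (palabra : String) (caracteres : String) : List (String × Int) :=
  (caracteres.toList.foldl (fun d c =>
      if d.contains (String.singleton c) then
        d.insert (String.singleton c) (d.getD (String.singleton c) 0 + 1)
      else if PySem.Str.isIn (String.singleton c) palabra then
        d.insert (String.singleton c) 1
      else
        d.insert (String.singleton c) 0)
    (PySem.Dict.empty : PySem.Dict String Int)).items

-- ===== PORT B =====
-- counting loop, then the dict comprehension; its keys (the counter's keys) are distinct,
-- so the comprehension's dict is exactly the map over counts.items()
def count_caracters2_alt (palabra : String) (caracteres : String) : List (String × Int) :=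
  let counts : PySem.Dict String Int :=
    caracteres.toList.foldl (fun d c =>
      d.insert (String.singleton c) (d.getD (String.singleton c) 0 + 1))
      PySem.Dict.empty
  counts.items.map (fun p => (p.1, if PySem.Str.isIn p.1 palabra then p.2 else p.2 - 1))

-- ===== PRECONDITION & SPEC =====
def Spec_count_caracters2 (palabra : String) (caracteres : String) (out : List (String × Int)) : Prop := out = count_caracters2_alt palabra caracteres
instance (palabra : String) (caracteres : String) (out : List (String × Int)) : Decidable (Spec_count_caracters2 palabra caracteres out) := by unfold Spec_count_caracters2; infer_instance

-- ===== CLAIM (what is proved, stated in full; the proofs are below) =====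
def Claim_equal_count_caracters2 : Prop := ∀ (palabra : String) (caracteres : String), Dom_count_caracters2 palabra caracteres → Spec_count_caracters2 palabra caracteres (count_caracters2 palabra caracteres)

-- ===== LEMMAS AND PROOFS =====

-- the value adjustment B's second pass applies
def pvAdj (palabra : String) (k : String) (n : Int) : Int :=
  if PySem.Str.isIn k palabra then n else n - 1

theorem pvAdj_add_one (palabra k : String) (n : Int) :
    pvAdj palabra k (n + 1) = pvAdj palabra k n + 1 := by
  unfold pvAdj; split_ifs <;> ring

-- loop invariant: A's dict is B's counter with every value adjusted by pvAdj
theorem pv_fold_invariant (palabra : String) (l : List Char)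
    (dA dC : PySem.Dict String Int)
    (hnd : dA.keys.Nodup)
    (hit : dA.items = dC.items.map (fun p => (p.1, pvAdj palabra p.1 p.2))) :
    (l.foldl (fun d c =>
      if d.contains (String.singleton c) then
        d.insert (String.singleton c) (d.getD (String.singleton c) 0 + 1)
      else if PySem.Str.isIn (String.singleton c) palabra then
        d.insert (String.singleton c) 1
      else
        d.insert (String.singleton c) 0) dA).items
    = ((l.foldl (fun d c =>
        d.insert (String.singleton c) (d.getD (String.singleton c) 0 + 1)) dC).items).map
        (fun p => (p.1, pvAdj palabra p.1 p.2)) := by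
  induction l generalizing dA dC with
  | nil => simpa using hit
  | cons x xs ih =>
    simp only [List.foldl_cons]
    set k := String.singleton x with hk
    have hkeys : dA.keys = dC.keys := by
      simp only [PySem.Dict.keys, hit, List.map_map]
      rfl
    have hndC : dC.keys.Nodup := hkeys ▸ hnd
    have hcont : dA.contains k = dC.contains k := by
      rw [PySem.Dict.contains_eq_decide_mem_keys, PySem.Dict.contains_eq_decide_mem_keys, hkeys]
    by_cases hc : dC.contains k = true
    · -- key already present: both sides overwrite in place
      rw [hcont, hc, if_pos rfl]
      apply ih
      · exact PySem.Dict.nodup_keys_insert _ _ _ hnd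
      · -- value relation at k
        obtain ⟨v, hv⟩ : ∃ v, dC.get? k = some v := by
          have := PySem.Dict.contains_eq_isSome_get? dC k
          rw [hc] at this
          exact Option.isSome_iff_exists.mp this.symm
        have hmemC : (k, v) ∈ dC.items := PySem.Dict.mem_items_of_get?_eq_some dC hv
        have hgC : dC.getD k 0 = v := PySem.Dict.getD_of_mem_items dC hmemC hndC 0
        have hmemA : (k, pvAdj palabra k v) ∈ dA.items := by
          rw [hit]
          exact List.mem_map.mpr ⟨(k, v), hmemC, rfl⟩
        have hgA : dA.getD k 0 = pvAdj palabra k v := PySem.Dict.getD_of_mem_items dA hmemA hnd 0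
        rw [PySem.Dict.items_insert_of_contains dA _ (hcont.trans hc),
            PySem.Dict.items_insert_of_contains dC _ hc, hit, List.map_map, List.map_map]
        apply List.map_congr_left
        intro p hp
        by_cases hpk : p.1 = k
        · simp [Function.comp, hpk, hgA, hgC, pvAdj_add_one]
        · simp [Function.comp, hpk]
    · -- fresh key: both sides append
      rw [Bool.not_eq_true] at hc
      have hcA : dA.contains k = false := hcont.trans hc
      rw [hcA]
      simp only [Bool.false_eq_true, if_false]
      have hgC0 : dC.getD k 0 = 0 := PySem.Dict.getD_of_not_contains dC 0 hc
      split_ifs with hP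
      · apply ih
        · exact PySem.Dict.nodup_keys_insert _ _ _ hnd
        · rw [PySem.Dict.items_insert_of_not_contains dA _ hcA,
              PySem.Dict.items_insert_of_not_contains dC _ hc, List.map_append, hit, hgC0]
          simp only [List.map_cons, List.map_nil, pvAdj, if_pos hP, zero_add]
      · apply ih
        · exact PySem.Dict.nodup_keys_insert _ _ _ hnd
        · rw [PySem.Dict.items_insert_of_not_contains dA _ hcA,
              PySem.Dict.items_insert_of_not_contains dC _ hc, List.map_append, hit, hgC0]
          simp only [List.map_cons, List.map_nil, pvAdj, if_neg hP]
          norm_num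

-- ===== VERDICT (by name: the statement is the Claim_ definition above) =====
theorem count_caracters2_spec : Claim_equal_count_caracters2 := by
  intro palabra caracteres _
  unfold Spec_count_caracters2 count_caracters2 count_caracters2_alt
  simpa [pvAdj] using
    pv_fold_invariant palabra caracteres.toList PySem.Dict.empty PySem.Dict.empty
      PySem.Dict.nodup_keys_empty rfl
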